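-- pv_equiv track=rewrite | github.com/rimgosu/Algorithm | 프로그래머스/1/250121. ［PCCE 기출문제］ 10번 ／ 데이터 분석/［PCCE 기출문제］ 10번 ／ 데이터 분석.py | solution
-- ===== SOURCE A (Python) =====
-- def solution(data, ext, val_ext, sort_by):
--     answer = [[]]
--
--     ext_lst = ['code', 'date', 'maximum', 'remain']
--
--     for i in data:
--         if ext == ext_lst[0] and i[0] < val_ext:
--             answer.append(i)
--         elif ext == ext_lst[1] and i[1] < val_ext:
--             answer.append(i)
--         elif ext == ext_lst[2] and i[2] < val_ext:
--             answer.append(i)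
--         elif ext == ext_lst[3] and i[3] < val_ext:
--             answer.append(i)
--
--     answer.pop(0)
--
--     if sort_by == ext_lst[0]:
--         answer.sort(key=lambda x:x[0])
--     elif sort_by == ext_lst[1]:
--         answer.sort(key=lambda x:x[1])
--     elif sort_by == ext_lst[2]:
--
--         answer.sort(key=lambda x:x[2])
--     else:
--         answer.sort(key=lambda x:x[3])
--
--
--     return answer
-- ===== SOURCE B (Python) =====
-- def solution(data, ext, val_ext, sort_by):
--     cols = ['code', 'date', 'maximum', 'remain']
--     if ext not in cols:
--         return []
--     k = cols.index(ext)
--     s = cols.index(sort_by) if sort_by in cols[:3] else 3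
--     out = []
--     for row in data:
--         if row[k] < val_ext:
--             j = 0
--             while j < len(out) and out[j][s] <= row[s]:
--                 j += 1
--             out.insert(j, row)
--     return out
-- ===== Notes on version B (the rewrite author's own statement) =====
-- stated objective: alternative
-- what changed: Instead of A's branch-chain filter into a sentinel-seeded list followed by a four-way list.sort, B makes one pass over data maintaining an always-sorted accumulator, inserting each passing row at its sorted position (online stable insertion sort, no sort call).
import Mathlib
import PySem

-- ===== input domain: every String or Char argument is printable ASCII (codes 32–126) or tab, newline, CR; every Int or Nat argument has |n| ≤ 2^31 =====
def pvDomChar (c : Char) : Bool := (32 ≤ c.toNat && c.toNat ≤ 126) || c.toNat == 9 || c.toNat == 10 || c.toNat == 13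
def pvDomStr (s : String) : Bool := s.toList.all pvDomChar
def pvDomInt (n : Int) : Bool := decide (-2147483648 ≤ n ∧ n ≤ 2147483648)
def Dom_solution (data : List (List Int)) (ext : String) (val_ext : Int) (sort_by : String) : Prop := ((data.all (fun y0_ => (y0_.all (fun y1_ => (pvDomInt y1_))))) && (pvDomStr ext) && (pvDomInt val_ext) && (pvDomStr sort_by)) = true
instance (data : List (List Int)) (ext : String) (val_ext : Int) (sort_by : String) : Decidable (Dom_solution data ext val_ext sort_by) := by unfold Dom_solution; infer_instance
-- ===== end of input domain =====

-- B replaces A's filter-then-sort (branch chain into a sentinel-seeded list, pop(0), four-way list.sort)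
-- with a single pass that keeps the accumulator sorted, inserting each passing row at its sorted
-- position — no sort call at all (objective: alternative).

-- ===== PORT A =====
-- Row indexing i[k] is ported as List.getD k 0: exact on in-range indices; Pre_solution excludes the
-- out-of-range accesses, on which Python raises IndexError.
def solution (data : List (List Int)) (ext : String) (val_ext : Int) (sort_by : String) : List (List Int) :=
  let answer : List (List Int) := [[]]
  let answer := data.foldl (fun answer i =>
    if ext = "code" ∧ i.getD 0 0 < val_ext then answer ++ [i]
    else if ext = "date" ∧ i.getD 1 0 < val_ext then answer ++ [i]
    else if ext = "maximum" ∧ i.getD 2 0 < val_ext then answer ++ [i]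
    else if ext = "remain" ∧ i.getD 3 0 < val_ext then answer ++ [i]
    else answer) answer
  let answer := answer.drop 1  -- answer.pop(0)
  if sort_by = "code" then PySem.List.sorted answer (fun x => x.getD 0 0)
  else if sort_by = "date" then PySem.List.sorted answer (fun x => x.getD 1 0)
  else if sort_by = "maximum" then PySem.List.sorted answer (fun x => x.getD 2 0)
  else PySem.List.sorted answer (fun x => x.getD 3 0)

-- ===== PORT B =====
-- Source B's inner while/insert: walk from the front past rows whose sort key is ≤ the new row's key,
-- then insert there.
def bIns (key : List Int → Int) (x : List Int) : List (List Int) → List (List Int)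
  | [] => [x]
  | y :: t => if key y ≤ key x then y :: bIns key x t else x :: y :: t

def solution_alt (data : List (List Int)) (ext : String) (val_ext : Int) (sort_by : String) : List (List Int) :=
  let cols : List String := ["code", "date", "maximum", "remain"]
  match PySem.List.index? cols ext with
  | none => []
  | some k =>
    let s := (PySem.List.index? (cols.take 3) sort_by).getD 3
    data.foldl (fun out row =>
      if row.getD k 0 < val_ext then bIns (fun r => r.getD s 0) row out else out) []

-- ===== PRECONDITION & SPEC =====
-- helper name for Pre_ only (not used by the ports)
def pvSortCol (sort_by : String) : Nat :=
  if sort_by = "code" then 0 else if sort_by = "date" then 1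
  else if sort_by = "maximum" then 2 else 3

-- Pre_ excludes exactly the inputs where Python A raises IndexError: when ext names a column, every
-- row must have that column, and every row passing the filter must also have the sort column.
def Pre_solution (data : List (List Int)) (ext : String) (val_ext : Int) (sort_by : String) : Prop :=
  ∀ row ∈ data,
    (ext = "code" → 0 < row.length ∧ (row.getD 0 0 < val_ext → pvSortCol sort_by < row.length)) ∧
    (ext = "date" → 1 < row.length ∧ (row.getD 1 0 < val_ext → pvSortCol sort_by < row.length)) ∧
    (ext = "maximum" → 2 < row.length ∧ (row.getD 2 0 < val_ext → pvSortCol sort_by < row.length)) ∧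
    (ext = "remain" → 3 < row.length ∧ (row.getD 3 0 < val_ext → pvSortCol sort_by < row.length))
instance (data : List (List Int)) (ext : String) (val_ext : Int) (sort_by : String) : Decidable (Pre_solution data ext val_ext sort_by) := by unfold Pre_solution; infer_instance

def pvWitness_solution : List (List Int) × String × Int × String := ([[1, 2, 3, 4], [5, 6, 7, 8]], "code", 5, "date")

def Spec_solution (data : List (List Int)) (ext : String) (val_ext : Int) (sort_by : String) (out : List (List Int)) : Prop := out = solution_alt data ext val_ext sort_by
instance (data : List (List Int)) (ext : String) (val_ext : Int) (sort_by : String) (out : List (List Int)) : Decidable (Spec_solution data ext val_ext sort_by out) := by unfold Spec_solution; infer_instance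

-- ===== CLAIM (what is proved, stated in full; the proofs are below) =====
def Claim_equal_solution : Prop := ∀ (data : List (List Int)) (ext : String) (val_ext : Int) (sort_by : String), Dom_solution data ext val_ext sort_by → Pre_solution data ext val_ext sort_by → Spec_solution data ext val_ext sort_by (solution data ext val_ext sort_by)

-- ===== LEMMAS AND PROOFS =====

-- Source B's front-walking insert is PySem's insertBy for the strict-less test (linear order: ¬(x < y) ↔ y ≤ x).
theorem bIns_eq_insertBy (key : List Int → Int) (x : List Int) (l : List (List Int)) :
    bIns key x l = PySem.List.insertBy (fun a b => decide (key a < key b)) x l := by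
  induction l with
  | nil => rfl
  | cons y t ih =>
    simp only [bIns, PySem.List.insertBy, ih]
    by_cases h : key y ≤ key x
    · rw [if_pos h, if_neg (by simpa using not_lt.mpr h)]
    · rw [if_neg h, if_pos (by simpa using lt_of_not_ge h)]

-- B's single pass equals stable-sorting the filtered list.
theorem foldl_bIns_eq_sorted (data : List (List Int)) (p : List Int → Prop) [DecidablePred p] (key : List Int → Int) :
    data.foldl (fun out row => if p row then bIns key row out else out) []
      = PySem.List.sorted (data.filter (fun r => decide (p r))) key := by
  rw [PySem.List.sorted_eq_foldl_insertBy, List.foldl_filter]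
  congr 1
  funext acc row
  by_cases h : p row
  · simp [h, bIns_eq_insertBy]
  · simp [h]

theorem solution_eq_alt (data : List (List Int)) (ext : String) (val_ext : Int) (sort_by : String) :
    solution data ext val_ext sort_by = solution_alt data ext val_ext sort_by := by
  have hsort : ∀ l : List (List Int),
      (if sort_by = "code" then PySem.List.sorted l (fun x => x.getD 0 0)
       else if sort_by = "date" then PySem.List.sorted l (fun x => x.getD 1 0)
       else if sort_by = "maximum" then PySem.List.sorted l (fun x => x.getD 2 0)
       else PySem.List.sorted l (fun x => x.getD 3 0))
      = PySem.List.sorted l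
          (fun r => r.getD ((PySem.List.index? ["code", "date", "maximum"] sort_by).getD 3) 0) := by
    intro l
    by_cases s1 : sort_by = "code"
    · rw [s1, show PySem.List.index? ["code","date","maximum"] "code" = some 0 from by decide]
      simp
    by_cases s2 : sort_by = "date"
    · rw [s2, show PySem.List.index? ["code","date","maximum"] "date" = some 1 from by decide]
      simp
    by_cases s3 : sort_by = "maximum"
    · rw [s3, show PySem.List.index? ["code","date","maximum"] "maximum" = some 2 from by decide]
      simp
    · have hn : PySem.List.index? ["code","date","maximum"] sort_by = none := by
        simp [PySem.List.index?, List.idxOf?, List.findIdx?, List.findIdx?.go, beq_iff_eq,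
          Ne.symm s1, Ne.symm s2, Ne.symm s3]
      rw [hn]
      simp [s1, s2, s3]
  by_cases h1 : ext = "code"
  · rw [show solution_alt data ext val_ext sort_by
        = data.foldl (fun out row =>
            if row.getD 0 0 < val_ext then
              bIns (fun r => r.getD ((PySem.List.index? ["code","date","maximum"] sort_by).getD 3) 0) row out
            else out) [] from by rw [h1]; rfl]
    rw [foldl_bIns_eq_sorted data (fun row => row.getD 0 0 < val_ext)]
    unfold solution
    rw [h1]
    simp only [String.reduceEq, false_and, if_false, true_and]
    rw [PySem.List.foldl_append_ite_eq_filter]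
    simp only [List.cons_append, List.nil_append, List.drop_succ_cons, List.drop_zero]
    exact hsort _
  by_cases h2 : ext = "date"
  · rw [show solution_alt data ext val_ext sort_by
        = data.foldl (fun out row =>
            if row.getD 1 0 < val_ext then
              bIns (fun r => r.getD ((PySem.List.index? ["code","date","maximum"] sort_by).getD 3) 0) row out
            else out) [] from by rw [h2]; rfl]
    rw [foldl_bIns_eq_sorted data (fun row => row.getD 1 0 < val_ext)]
    unfold solution
    rw [h2]
    simp only [String.reduceEq, false_and, if_false, true_and]
    rw [PySem.List.foldl_append_ite_eq_filter]
    simp only [List.cons_append, List.nil_append, List.drop_succ_cons, List.drop_zero]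
    exact hsort _
  by_cases h3 : ext = "maximum"
  · rw [show solution_alt data ext val_ext sort_by
        = data.foldl (fun out row =>
            if row.getD 2 0 < val_ext then
              bIns (fun r => r.getD ((PySem.List.index? ["code","date","maximum"] sort_by).getD 3) 0) row out
            else out) [] from by rw [h3]; rfl]
    rw [foldl_bIns_eq_sorted data (fun row => row.getD 2 0 < val_ext)]
    unfold solution
    rw [h3]
    simp only [String.reduceEq, false_and, if_false, true_and]
    rw [PySem.List.foldl_append_ite_eq_filter]
    simp only [List.cons_append, List.nil_append, List.drop_succ_cons, List.drop_zero]
    exact hsort _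
  by_cases h4 : ext = "remain"
  · rw [show solution_alt data ext val_ext sort_by
        = data.foldl (fun out row =>
            if row.getD 3 0 < val_ext then
              bIns (fun r => r.getD ((PySem.List.index? ["code","date","maximum"] sort_by).getD 3) 0) row out
            else out) [] from by rw [h4]; rfl]
    rw [foldl_bIns_eq_sorted data (fun row => row.getD 3 0 < val_ext)]
    unfold solution
    rw [h4]
    simp only [String.reduceEq, false_and, if_false, true_and]
    rw [PySem.List.foldl_append_ite_eq_filter]
    simp only [List.cons_append, List.nil_append, List.drop_succ_cons, List.drop_zero]
    exact hsort _
  · have hnone : List.idxOf? ext ["code","date","maximum","remain"] = none := by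
      simp [List.idxOf?, List.findIdx?, List.findIdx?.go, beq_iff_eq,
        Ne.symm h1, Ne.symm h2, Ne.symm h3, Ne.symm h4]
    unfold solution solution_alt
    simp [PySem.List.index?, hnone, h1, h2, h3, h4, PySem.List.sorted]

-- ===== VERDICT (by name: the statement is the Claim_ definition above) =====
theorem solution_spec : Claim_equal_solution := by
  intro data ext val_ext sort_by _ _
  unfold Spec_solution
  exact solution_eq_alt data ext val_ext sort_by
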